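-- pv_equiv track=rewrite | github.com/Nicholas-Baron/security_project | main.py | anonymized
-- ===== SOURCE A (Python) =====
-- def anonymized(value):
--     if type(value) is int:
--         if value <= 0:
--             return value
--         # Make the lowest non-zero digit a zero.
--         val_str = str(value)
--         for x in range(1, len(val_str) + 1):
--             if val_str[-x] != "0":
--                 val_str = val_str[: -(x + 1)] + "0" + ("0" * x)
--                 break
--
--         assert int(val_str) < value, {"val_str": val_str, "value": value}
--
--         return int(val_str)
--     else:
--         assert False, ("Could not anonymize ", value)
-- ===== SOURCE B (Python) =====
-- def anonymized(value):
--     if type(value) is int: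
--         if value <= 0:
--             return value
--         # count trailing zero digits, then zero out the lowest p+2 digits arithmetically
--         p = 0
--         v = value
--         while v % 10 == 0:
--             v //= 10
--             p += 1
--         m = 10 ** (p + 2)
--         return value // m * m
--     else:
--         assert False, ("Could not anonymize ", value)
-- ===== Notes on version B (the rewrite author's own statement) =====
-- stated objective: simpler
-- what changed: B replaces A's string round-trip (str of value, scan for the lowest non-zero digit, slice-and-pad, int of the result) with pure integer arithmetic: count trailing zero digits p by repeated division, then return value floor-divided by 10^(p+2) and multiplied back.
import Mathlib
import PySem

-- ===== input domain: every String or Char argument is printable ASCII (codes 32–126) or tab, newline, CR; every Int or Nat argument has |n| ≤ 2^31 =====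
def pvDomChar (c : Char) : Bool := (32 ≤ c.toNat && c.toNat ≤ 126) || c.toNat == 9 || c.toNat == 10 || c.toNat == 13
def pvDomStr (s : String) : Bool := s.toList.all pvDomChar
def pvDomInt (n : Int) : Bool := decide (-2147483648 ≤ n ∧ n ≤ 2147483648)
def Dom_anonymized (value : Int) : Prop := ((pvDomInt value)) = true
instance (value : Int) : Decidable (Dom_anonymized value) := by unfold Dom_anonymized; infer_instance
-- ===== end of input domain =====

-- B zeroes the lowest non-zero digit (and, like A, the digit just above it) by pure
-- integer arithmetic instead of string surgery; objective: simpler (no string round-trip).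

-- ===== PORT A =====
-- int(val_str) for the strings this function builds: val_str is always a nonempty run
-- of ASCII digits (a prefix of str(value) followed by '0's), on which Python's int(s)
-- is exactly this left fold; ported by hand (exact on that digit-only domain) because
-- the equivalence proof must reason about it symbolically.
def pvDigitsToNat (cs : List Char) : Nat := cs.foldl (fun a c => 10 * a + (c.toNat - 48)) 0

-- the 'for x in range(1, len(val_str) + 1): if val_str[-x] != "0": …; break' loop;
-- val_str[-x] is always in range here (1 ≤ x ≤ len), so the total pyGetD form is exact
def pvAnonLoop (s : List Char) (xs : List Int) : List Char :=
  match xs with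
  | [] => s
  | x :: rest =>
    if PySem.List.pyGetD s (-x) '0' ≠ '0' then
      -- val_str = val_str[: -(x + 1)] + "0" + ("0" * x); break
      PySem.List.slice s none (some (-(x + 1))) ++ '0' :: List.replicate x.toNat '0'
    else pvAnonLoop s rest

def anonymized (value : Int) : Int :=
  if value ≤ 0 then value
  else
    let valStr := PySem.Int.toChars value
    let res := pvAnonLoop valStr (PySem.List.pyRange 1 (PySem.List.len valStr + 1) 1)
    -- the 'assert int(val_str) < value' never fires (a non-zero digit was zeroed); omitted
    (pvDigitsToNat res : Int)

-- ===== PORT B =====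
-- p = number of trailing zero digits of v ('while v % 10 == 0: v //= 10; p += 1');
-- the v ≠ 0 guard only makes the recursion total (v > 0 whenever the loop runs)
def pvTrailingZeros (v : Nat) : Nat :=
  if h : v % 10 = 0 ∧ v ≠ 0 then pvTrailingZeros (v / 10) + 1 else 0
termination_by v
decreasing_by exact Nat.div_lt_self (Nat.pos_of_ne_zero h.2) (by norm_num)

def anonymized_alt (value : Int) : Int :=
  if value ≤ 0 then value
  else
    let p := pvTrailingZeros value.toNat
    let m : Int := 10 ^ (p + 2)
    PySem.Int.floordiv value m * m

-- ===== PRECONDITION & SPEC =====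
def Spec_anonymized (value : Int) (out : Int) : Prop := out = anonymized_alt value
instance (value : Int) (out : Int) : Decidable (Spec_anonymized value out) := by unfold Spec_anonymized; infer_instance

-- ===== CLAIM (what is proved, stated in full; the proofs are below) =====
def Claim_equal_anonymized : Prop := ∀ (value : Int), Dom_anonymized value → Spec_anonymized value (anonymized value)

-- ===== LEMMAS AND PROOFS =====

-- accumulator of Nat.toDigitsCore factors out
lemma pvToDigitsCore_acc (b f : Nat) : ∀ (n : Nat) (acc : List Char),
    Nat.toDigitsCore b f n acc = Nat.toDigitsCore b f n [] ++ acc := by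
  induction f with
  | zero => intro n acc; simp [Nat.toDigitsCore]
  | succ f ih =>
    intro n acc
    simp only [Nat.toDigitsCore]
    by_cases h : n / b = 0
    · simp [h]
    · simp only [h, if_false]
      rw [ih (n / b) (Nat.digitChar (n % b) :: acc), ih (n / b) [Nat.digitChar (n % b)]]
      simp

-- fuel irrelevance of Nat.toDigitsCore (base 10) once it exceeds n
lemma pvToDigitsCore_fuel : ∀ (n f f' : Nat), n < f → n < f' → ∀ acc,
    Nat.toDigitsCore 10 f n acc = Nat.toDigitsCore 10 f' n acc := by
  intro n
  induction n using Nat.strong_induction_on with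
  | _ n ih =>
    intro f f' hf hf' acc
    match f, f' with
    | f + 1, f' + 1 =>
      simp only [Nat.toDigitsCore]
      by_cases h : n / 10 = 0
      · simp [h]
      · simp only [h, if_false]
        exact ih (n / 10) (Nat.div_lt_self (Nat.pos_of_ne_zero (by
          intro h0; exact h (by simp [h0]))) (by norm_num)) f f'
          (by omega) (by omega) _

-- peeling the last decimal digit off str(n)
lemma pvToDigits_step (n : Nat) (h : 10 ≤ n) :
    Nat.toDigits 10 n = Nat.toDigits 10 (n / 10) ++ [Nat.digitChar (n % 10)] := by
  have hne : n / 10 ≠ 0 := by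
    intro h0; have := Nat.div_eq_of_lt (show n < 10 by omega); omega
  show Nat.toDigitsCore 10 (n + 1) n [] = _
  rw [show Nat.toDigitsCore 10 (n + 1) n [] =
      Nat.toDigitsCore 10 n (n / 10) [Nat.digitChar (n % 10)] by
    simp [Nat.toDigitsCore, hne]]
  rw [pvToDigitsCore_acc 10 n (n / 10) [Nat.digitChar (n % 10)]]
  congr 1
  exact pvToDigitsCore_fuel (n / 10) n (n / 10 + 1)
    (Nat.div_lt_self (by omega) (by norm_num)) (Nat.lt_succ_self _) []

lemma pvToDigits_single (n : Nat) (h : n < 10) :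
    Nat.toDigits 10 n = [Nat.digitChar n] := by
  show Nat.toDigitsCore 10 (n + 1) n [] = _
  simp [Nat.toDigitsCore, Nat.div_eq_of_lt h, Nat.mod_eq_of_lt h]

lemma pvToDigits_ne_nil (n : Nat) : Nat.toDigits 10 n ≠ [] := by
  by_cases h : n < 10
  · simp [pvToDigits_single n h]
  · simp [pvToDigits_step n (by omega)]

lemma pvToDigits_last (m : Nat) :
    (Nat.toDigits 10 m).getLast? = some (Nat.digitChar (m % 10)) := by
  by_cases h : m < 10
  · rw [pvToDigits_single m h, Nat.mod_eq_of_lt h]; rfl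
  · rw [pvToDigits_step m (by omega)]; simp

lemma pvDigitChar_eq_zero (k : Nat) (hk : k < 10) : (Nat.digitChar k = '0') ↔ k = 0 := by
  interval_cases k <;> simp [Nat.digitChar]

lemma pvDigitChar_toNat (k : Nat) (hk : k < 10) : (Nat.digitChar k).toNat - 48 = k := by
  interval_cases k <;> decide

-- the suffix of str(n) holding its last j digits
def pvSfx (j n : Nat) : List Char :=
  match j with
  | 0 => []
  | j + 1 => pvSfx j (n / 10) ++ [Nat.digitChar (n % 10)]

lemma pvSfx_length (j : Nat) : ∀ n, (pvSfx j n).length = j := by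
  induction j with
  | zero => intro n; rfl
  | succ j ih => intro n; simp [pvSfx, ih]

lemma pvToDigits_decomp (j : Nat) : ∀ n, 0 < n / 10 ^ j →
    Nat.toDigits 10 n = Nat.toDigits 10 (n / 10 ^ j) ++ pvSfx j n := by
  induction j with
  | zero => intro n _; simp [pvSfx]
  | succ j ih =>
    intro n hn
    have hpow : (10:Nat) ≤ 10 ^ (j + 1) := by
      calc (10:Nat) = 10 ^ 1 := (pow_one 10).symm
        _ ≤ 10 ^ (j + 1) := Nat.pow_le_pow_right (by norm_num) (by omega)
    have h10 : 10 ≤ n := by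
      by_contra h
      have : n / 10 ^ (j + 1) = 0 := Nat.div_eq_of_lt (by omega)
      omega
    have hdiv : n / 10 / 10 ^ j = n / 10 ^ (j + 1) := by
      rw [Nat.div_div_eq_div_mul, pow_succ, mul_comm]
    rw [pvToDigits_step n h10, ih (n / 10) (by rw [hdiv]; exact hn)]
    simp only [pvSfx]
    rw [hdiv, List.append_assoc]

lemma pvSfx_zeros (j : Nat) : ∀ n, 10 ^ j ∣ n → pvSfx j n = List.replicate j '0' := by
  induction j with
  | zero => intro n _; rfl
  | succ j ih =>
    intro n hj
    have h10 : (10:Nat) ∣ n := dvd_trans (dvd_pow_self 10 (by omega)) hj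
    have hmod : n % 10 = 0 := Nat.mod_eq_zero_of_dvd h10
    have hdvd : 10 ^ j ∣ n / 10 := by
      rcases hj with ⟨q, hq⟩
      exact ⟨q, by subst hq; rw [pow_succ, mul_comm (10 ^ j) 10, mul_assoc, Nat.mul_div_cancel_left _ (by norm_num)]⟩
    simp [pvSfx, ih (n / 10) hdvd, hmod, Nat.digitChar, List.replicate_succ' (n := j)]

-- digit-fold lemmas
lemma pvDigitsToNat_append_zeros (u : List Char) (k : Nat) :
    pvDigitsToNat (u ++ List.replicate k '0') = pvDigitsToNat u * 10 ^ k := by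
  induction k with
  | zero => simp [pvDigitsToNat]
  | succ k ih =>
    rw [List.replicate_succ' (n := k), ← List.append_assoc]
    have h1 : pvDigitsToNat ((u ++ List.replicate k '0') ++ ['0']) =
        10 * pvDigitsToNat (u ++ List.replicate k '0') + ('0'.toNat - 48) := by
      simp [pvDigitsToNat, List.foldl_append]
    rw [h1, ih]
    have : '0'.toNat - 48 = 0 := by decide
    rw [this, pow_succ]
    ring

lemma pvDigitsToNat_toDigits : ∀ n, pvDigitsToNat (Nat.toDigits 10 n) = n := by
  intro n
  induction n using Nat.strong_induction_on with
  | _ n ih =>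
    by_cases h : n < 10
    · rw [pvToDigits_single n h]
      simp [pvDigitsToNat, pvDigitChar_toNat n h]
    · rw [pvToDigits_step n (by omega)]
      have h1 : pvDigitsToNat (Nat.toDigits 10 (n / 10) ++ [Nat.digitChar (n % 10)]) =
          10 * pvDigitsToNat (Nat.toDigits 10 (n / 10)) + ((Nat.digitChar (n % 10)).toNat - 48) := by
        simp [pvDigitsToNat, List.foldl_append]
      rw [h1, ih (n / 10) (Nat.div_lt_self (by omega) (by norm_num)),
        pvDigitChar_toNat (n % 10) (Nat.mod_lt n (by norm_num))]
      omega

-- trailing-zero count facts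
lemma pvTrailingZeros_dvd (v : Nat) : 10 ^ pvTrailingZeros v ∣ v := by
  fun_induction pvTrailingZeros v with
  | case1 v h ih =>
    rcases ih with ⟨q, hq⟩
    exact ⟨q, by rw [pow_succ, mul_comm (10 ^ pvTrailingZeros (v / 10)) 10, mul_assoc, ← hq,
      Nat.mul_div_cancel' (Nat.dvd_of_mod_eq_zero h.1)]⟩
  | case2 v h => simp

lemma pvTrailingZeros_mod (v : Nat) (hv : v ≠ 0) :
    v / 10 ^ pvTrailingZeros v % 10 ≠ 0 := by
  fun_induction pvTrailingZeros v with
  | case1 v h ih =>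
    have hv10 : v / 10 ≠ 0 := by
      intro h0
      have hlt : v < 10 := Nat.lt_of_div_eq_zero (by norm_num) h0
      have : v = 0 := by omega
      exact h.2 this
    have := ih hv10
    rw [pow_succ, mul_comm, ← Nat.div_div_eq_div_mul]
    exact this
  | case2 v h =>
    simp only [pow_zero, Nat.div_one]
    rcases Classical.em (v % 10 = 0) with h0 | h0
    · exact absurd ⟨h0, hv⟩ h
    · exact h0

-- running A's loop over a string whose last p characters are '0' and whose (p+1)-th
-- character from the end is not
lemma pvLoop_run (s : List Char) (p : Nat)
    (hlen : p + 1 ≤ s.length)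
    (h0 : ∀ x : Nat, 1 ≤ x → x ≤ p → s[s.length - x]? = some '0')
    (hnz : s[s.length - (p + 1)]? ≠ some '0') :
    ∀ (k a : Nat), 1 ≤ a → a ≤ p + 1 → p + 1 - a = k →
    pvAnonLoop s (PySem.List.pyRange (a : Int) (PySem.List.len s + 1) 1) =
      List.take (s.length - (p + 2)) s ++ List.replicate (p + 2) '0' := by
  intro k
  induction k with
  | zero =>
    intro a ha hap hk
    have hap' : a = p + 1 := by omega
    subst hap'
    rw [PySem.List.pyRange_one_cons (by rw [PySem.List.len_eq]; push_cast; omega)]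
    simp only [pvAnonLoop]
    have hidx : s.length - (p + 1) < s.length := by omega
    have hget : PySem.List.pyGetD s (-((p + 1 : Nat) : Int)) '0' =
        s[s.length - (p + 1)] := PySem.List.pyGetD_neg_natCast s (p + 1) '0' (by omega) hlen
    have hval : s[s.length - (p + 1)] ≠ '0' := by
      intro hc
      exact hnz (by rw [List.getElem?_eq_getElem hidx, hc])
    rw [if_pos (by rw [hget]; exact hval)]
    rw [show (-(((p + 1 : Nat) : Int) + 1)) = -(((p + 2 : Nat) : Int)) from by omega]
    rw [PySem.List.slice_to_neg_natCast s (p + 2) (by omega)]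
    simp [List.replicate_succ]
  | succ k ih =>
    intro a ha hap hk
    have hap' : a ≤ p := by omega
    rw [PySem.List.pyRange_one_cons (by rw [PySem.List.len_eq]; omega)]
    simp only [pvAnonLoop]
    have hget : PySem.List.pyGetD s (-((a : Nat) : Int)) '0' =
        s[s.length - a] := PySem.List.pyGetD_neg_natCast s a '0' (by omega) (by omega)
    have hidx : s.length - a < s.length := by omega
    have hval : s[s.length - a] = '0' := by
      have := h0 a ha hap'
      rw [List.getElem?_eq_getElem hidx] at this
      exact Option.some.inj this
    rw [if_neg (by rw [hget, hval]; simp)]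
    have hcast : ((a : Nat) : Int) + 1 = (((a + 1 : Nat)) : Int) := by omega
    rw [hcast]
    exact ih (a + 1) (by omega) (by omega) (by omega)

-- A's positive branch computes exactly B's arithmetic value
lemma pvMain (n : Nat) (hn : 0 < n) :
    pvDigitsToNat (pvAnonLoop (Nat.toDigits 10 n)
        (PySem.List.pyRange 1 (PySem.List.len (Nat.toDigits 10 n) + 1) 1)) =
      n / 10 ^ (pvTrailingZeros n + 2) * 10 ^ (pvTrailingZeros n + 2) := by
  have hdvd := pvTrailingZeros_dvd n
  set p := pvTrailingZeros n with hp
  have hMpos : 0 < n / 10 ^ p := Nat.div_pos (Nat.le_of_dvd hn hdvd) (by positivity)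
  have hMod : n / 10 ^ p % 10 ≠ 0 := pvTrailingZeros_mod n (by omega)
  have hdec : Nat.toDigits 10 n = Nat.toDigits 10 (n / 10 ^ p) ++ List.replicate p '0' := by
    rw [pvToDigits_decomp p n hMpos, pvSfx_zeros p n hdvd]
  have hL1 : 1 ≤ (Nat.toDigits 10 (n / 10 ^ p)).length := by
    have hne := pvToDigits_ne_nil (n / 10 ^ p)
    cases h : Nat.toDigits 10 (n / 10 ^ p) with
    | nil => exact absurd h hne
    | cons c cs => simp
  have hlen : (Nat.toDigits 10 n).length = (Nat.toDigits 10 (n / 10 ^ p)).length + p := by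
    rw [hdec]; simp
  have hplen : p + 1 ≤ (Nat.toDigits 10 n).length := by omega
  have h0 : ∀ x : Nat, 1 ≤ x → x ≤ p →
      (Nat.toDigits 10 n)[(Nat.toDigits 10 n).length - x]? = some '0' := by
    intro x h1 h2
    rw [hdec, List.getElem?_append_right (by simp; omega), List.getElem?_replicate,
      if_pos (by simp only [List.length_append, List.length_replicate]; omega)]
  have hnz : (Nat.toDigits 10 n)[(Nat.toDigits 10 n).length - (p + 1)]? ≠ some '0' := by
    rw [hdec, List.getElem?_append_left (by simp; omega)]
    rw [show (Nat.toDigits 10 (n / 10 ^ p) ++ List.replicate p '0').length - (p + 1) =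
        (Nat.toDigits 10 (n / 10 ^ p)).length - 1 from by simp; omega]
    rw [← List.getLast?_eq_getElem?, pvToDigits_last]
    intro hc
    have hv := Option.some.inj hc
    exact hMod ((pvDigitChar_eq_zero _ (Nat.mod_lt _ (by norm_num))).mp hv)
  have hrun := pvLoop_run (Nat.toDigits 10 n) p hplen h0 hnz p 1 (by omega) (by omega) (by omega)
  norm_num at hrun
  rw [PySem.List.len_eq, hrun, pvDigitsToNat_append_zeros]
  by_cases hc : 0 < n / 10 ^ (p + 2)
  · have hdec2 := pvToDigits_decomp (p + 2) n hc
    rw [show List.take ((Nat.toDigits 10 n).length - (p + 2)) (Nat.toDigits 10 n) =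
        Nat.toDigits 10 (n / 10 ^ (p + 2)) from by
      rw [hdec2]
      exact List.take_left' (by simp [pvSfx_length])]
    rw [pvDigitsToNat_toDigits]
  · have hz : n / 10 ^ (p + 2) = 0 := Nat.le_zero.mp (Nat.not_lt.mp hc)
    have hn2 : n < 10 ^ (p + 2) := Nat.lt_of_div_eq_zero (by positivity) hz
    have hle : (Nat.toDigits 10 n).length ≤ p + 2 := Nat.toDigits_length 10 n (p + 2) (by omega) hn2
    rw [show (Nat.toDigits 10 n).length - (p + 2) = 0 from by omega, List.take_zero, hz]
    simp [pvDigitsToNat]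

-- ===== VERDICT (by name: the statement is the Claim_ definition above) =====
theorem anonymized_spec : Claim_equal_anonymized := by
  intro value _
  unfold Spec_anonymized anonymized anonymized_alt
  by_cases hv : value ≤ 0
  · simp [hv]
  · simp only [hv, if_false]
    have hnlt : ¬ value < 0 := by omega
    have htc : PySem.Int.toChars value = Nat.toDigits 10 value.toNat := by
      simp [PySem.Int.toChars, hnlt]
    have hNpos : 0 < value.toNat := by omega
    rw [htc, pvMain value.toNat hNpos]
    rw [PySem.Int.floordiv_eq_ediv_of_pos (by positivity)]
    rw [show value = ((value.toNat : Nat) : Int) from (Int.toNat_of_nonneg (by omega)).symm]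
    push_cast [Int.natCast_div]
    simp
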